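-- pv_equiv track=rewrite | github.com/iiMaXii/advent_of_code_2023 | day_11/main.py | get_distance_sum
-- ===== SOURCE A (Python) =====
-- Point = tuple[int, int]
--
-- def get_distance_sum(
--     points: list[Point], cols: list[int], rows: list[int], multiplier: int
-- ) -> int:
--     distance = 0
--     for n, p1 in enumerate(points):
--         for p2 in points[n + 1 :]:
--             x1, y1 = p1
--             x2, y2 = p2
--             x1_offset = 0
--             x2_offset = 0
--             for x in cols:
--                 if x1 < x < x2:
--                     x2_offset += multiplier - 1
--                 elif x2 < x < x1:
--                     x1_offset += multiplier - 1
--             y1_offset = 0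
--             y2_offset = 0
--             for y in rows:
--                 if y1 < y < y2:
--                     y2_offset += multiplier - 1
--                 elif y2 < y < y1:
--                     y1_offset += multiplier - 1
--
--             x1 += x1_offset
--             x2 += x2_offset
--             y1 += y1_offset
--             y2 += y2_offset
--
--             distance += abs(x1 - x2) + abs(y1 - y2)
--
--     return distance
-- ===== SOURCE B (Python) =====
-- # Faster: count the expansion lines below each point once, so every pair costs
-- # O(1) arithmetic instead of a rescan of all columns and rows.
-- def _axis(a, a_lt, a_le, b, b_lt, b_le, m):
--     # distance along one axis after expansion: |signed expanded gap|
--     if a < b: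
--         return abs(b - a + m * (b_lt - a_le))
--     if b < a:
--         return abs(a - b + m * (a_lt - b_le))
--     return 0
--
--
-- def get_distance_sum(points, cols, rows, multiplier):
--     m = multiplier - 1
--     aug = [
--         (x, sum(1 for c in cols if c < x), sum(1 for c in cols if c <= x),
--          y, sum(1 for r in rows if r < y), sum(1 for r in rows if r <= y))
--         for x, y in points
--     ]
--     total = 0
--     for i, (x1, x1_lt, x1_le, y1, y1_lt, y1_le) in enumerate(aug):
--         for x2, x2_lt, x2_le, y2, y2_lt, y2_le in aug[i + 1:]:
--             total += _axis(x1, x1_lt, x1_le, x2, x2_lt, x2_le, m)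
--             total += _axis(y1, y1_lt, y1_le, y2, y2_lt, y2_le, m)
--     return total
-- ===== Notes on version B (the rewrite author's own statement) =====
-- stated objective: faster
-- what changed: B counts the expansion lines strictly-below and below-or-equal each point's coordinates once up front, so each pair is O(1) arithmetic (lines strictly between a<b is lt[b]-le[a]) instead of A's rescan of all columns and rows for every pair.
import Mathlib
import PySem

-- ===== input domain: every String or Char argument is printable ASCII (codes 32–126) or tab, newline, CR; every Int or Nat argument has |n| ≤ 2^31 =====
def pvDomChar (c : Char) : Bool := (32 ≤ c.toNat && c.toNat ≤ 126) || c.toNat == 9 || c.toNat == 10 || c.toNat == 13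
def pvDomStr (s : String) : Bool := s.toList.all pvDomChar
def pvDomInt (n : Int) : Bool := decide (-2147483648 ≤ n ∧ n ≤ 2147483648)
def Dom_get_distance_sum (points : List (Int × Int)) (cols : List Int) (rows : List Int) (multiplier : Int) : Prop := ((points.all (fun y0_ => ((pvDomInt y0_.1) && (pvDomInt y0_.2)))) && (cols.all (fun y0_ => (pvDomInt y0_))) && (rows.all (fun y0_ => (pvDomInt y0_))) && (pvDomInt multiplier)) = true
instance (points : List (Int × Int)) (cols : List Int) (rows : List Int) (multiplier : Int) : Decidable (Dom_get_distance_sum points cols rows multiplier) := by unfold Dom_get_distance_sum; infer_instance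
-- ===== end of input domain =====

-- B counts the expansion lines below each point once, making each pair O(1)
-- arithmetic instead of a rescan of all columns and rows (objective: faster).

-- Python's abs on integers (shared arithmetic helper)
def pyAbs (x : Int) : Int := if x < 0 then -x else x

-- ===== PORT A =====
def get_distance_sum (points : List (Int × Int)) (cols : List Int) (rows : List Int) (multiplier : Int) : Int :=
  (PySem.List.enumerate points 0).foldl
    (fun distance np =>
      (PySem.List.slice points (some (np.1 + 1)) none).foldl
        (fun d p2 =>
          let x1 := np.2.1; let y1 := np.2.2
          let x2 := p2.1; let y2 := p2.2
          let xo := cols.foldl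
            (fun (o : Int × Int) x =>
              if x1 < x ∧ x < x2 then (o.1, o.2 + (multiplier - 1))
              else if x2 < x ∧ x < x1 then (o.1 + (multiplier - 1), o.2)
              else o) (0, 0)
          let yo := rows.foldl
            (fun (o : Int × Int) y =>
              if y1 < y ∧ y < y2 then (o.1, o.2 + (multiplier - 1))
              else if y2 < y ∧ y < y1 then (o.1 + (multiplier - 1), o.2)
              else o) (0, 0)
          d + (pyAbs ((x1 + xo.1) - (x2 + xo.2)) + pyAbs ((y1 + yo.1) - (y2 + yo.2))))
        distance)
    0

-- ===== PORT B =====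
-- _axis: distance along one axis after expansion, |signed expanded gap|
def altAxis (a a_lt a_le b b_lt b_le m : Int) : Int :=
  if a < b then pyAbs (b - a + m * (b_lt - a_le))
  else if b < a then pyAbs (a - b + m * (a_lt - b_le))
  else 0

-- one entry of B's augmented list: (x, x_lt, x_le, y, y_lt, y_le)
structure Aug where
  x : Int
  xlt : Int
  xle : Int
  y : Int
  ylt : Int
  yle : Int
deriving DecidableEq, Repr

def get_distance_sum_alt (points : List (Int × Int)) (cols : List Int) (rows : List Int) (multiplier : Int) : Int :=
  let m := multiplier - 1
  let aug := points.map (fun p =>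
    { x := p.1,
      xlt := (cols.countP (fun c => decide (c < p.1)) : Int),
      xle := (cols.countP (fun c => decide (c ≤ p.1)) : Int),
      y := p.2,
      ylt := (rows.countP (fun r => decide (r < p.2)) : Int),
      yle := (rows.countP (fun r => decide (r ≤ p.2)) : Int) : Aug })
  (PySem.List.enumerate aug 0).foldl
    (fun total iq =>
      (PySem.List.slice aug (some (iq.1 + 1)) none).foldl
        (fun t q2 =>
          t + altAxis iq.2.x iq.2.xlt iq.2.xle q2.x q2.xlt q2.xle m
            + altAxis iq.2.y iq.2.ylt iq.2.yle q2.y q2.ylt q2.yle m)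
        total)
    0

-- ===== PRECONDITION & SPEC =====
def Spec_get_distance_sum (points : List (Int × Int)) (cols : List Int) (rows : List Int) (multiplier : Int) (out : Int) : Prop := out = get_distance_sum_alt points cols rows multiplier
instance (points : List (Int × Int)) (cols : List Int) (rows : List Int) (multiplier : Int) (out : Int) : Decidable (Spec_get_distance_sum points cols rows multiplier out) := by unfold Spec_get_distance_sum; infer_instance

-- ===== CLAIM (what is proved, stated in full; the proofs are below) =====
def Claim_equal_get_distance_sum : Prop := ∀ (points : List (Int × Int)) (cols : List Int) (rows : List Int) (multiplier : Int), Dom_get_distance_sum points cols rows multiplier → Spec_get_distance_sum points cols rows multiplier (get_distance_sum points cols rows multiplier)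

-- ===== LEMMAS AND PROOFS =====

-- reference shape: sum of g over all unordered pairs, in traversal order
def pairSum {α : Type} (g : α → α → Int) : List α → Int
  | [] => 0
  | p :: ps => (ps.map (g p)).sum + pairSum g ps

theorem pairSum_map {α β : Type} (g : β → β → Int) (h : α → β) :
    ∀ l : List α, pairSum g (l.map h) = pairSum (fun a b => g (h a) (h b)) l := by
  intro l
  induction l with
  | nil => rfl
  | cons p ps ih => simp [pairSum, ih, List.map_map, Function.comp_def]

theorem pairSum_congr {α : Type} (f g : α → α → Int) (l : List α)
    (h : ∀ a b, f a b = g a b) : pairSum f l = pairSum g l := by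
  induction l with
  | nil => rfl
  | cons p ps ih =>
      simp only [pairSum, ih]
      congr 1
      exact congrArg List.sum (List.map_congr_left (fun b _ => h p b))

theorem foldEnumDrop {α : Type} (g : α → α → Int) :
    ∀ (l full : List α) (j : ℕ) (acc : Int), full.drop j = l →
      (PySem.List.enumerate l (j : Int)).foldl
        (fun d np =>
          (PySem.List.slice full (some (np.1 + 1)) none).foldl
            (fun d2 p2 => d2 + g np.2 p2) d) acc
      = acc + pairSum g l := by
  intro l
  induction l with
  | nil => intro full j acc _; simp [PySem.List.enumerate, pairSum]
  | cons p ps ih =>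
      intro full j acc hdrop
      rw [PySem.List.enumerate_cons]
      have hj1 : ((j : Int) + 1) = ((j + 1 : ℕ) : Int) := by push_cast; ring
      have hdrop' : full.drop (j + 1) = ps := by
        have : full.drop (j + 1) = (full.drop j).drop 1 := by
          rw [List.drop_drop]
        rw [this, hdrop]; rfl
      simp only [List.foldl_cons, hj1, PySem.List.slice_from_natCast, hdrop']
      rw [PySem.List.foldl_add (g := fun p2 => g p p2)]
      rw [ih full (j + 1) _ hdrop']
      simp [pairSum]; ring

-- A's inner scan over cols computes (m·count strictly between x2 and x1, m·count strictly between x1 and x2)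
theorem colsFold (x1 x2 m : Int) :
    ∀ (cols : List Int) (o1 o2 : Int),
      cols.foldl
        (fun (o : Int × Int) x =>
          if x1 < x ∧ x < x2 then (o.1, o.2 + m)
          else if x2 < x ∧ x < x1 then (o.1 + m, o.2)
          else o) (o1, o2)
      = (o1 + m * (cols.countP (fun x => decide (x2 < x ∧ x < x1)) : Int),
         o2 + m * (cols.countP (fun x => decide (x1 < x ∧ x < x2)) : Int)) := by
  intro cols
  induction cols with
  | nil => intro o1 o2; simp
  | cons c cs ih =>
      intro o1 o2
      rw [List.foldl_cons]
      by_cases h1 : x1 < c ∧ c < x2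
      · rw [if_pos h1, ih]
        have e12 : (c :: cs).countP (fun x => decide (x1 < x ∧ x < x2))
            = cs.countP (fun x => decide (x1 < x ∧ x < x2)) + 1 := by
          rw [List.countP_cons]; split_ifs with hc
          · rfl
          · simp only [decide_eq_true_eq, not_and, not_lt] at hc; omega
        have e21 : (c :: cs).countP (fun x => decide (x2 < x ∧ x < x1))
            = cs.countP (fun x => decide (x2 < x ∧ x < x1)) := by
          rw [List.countP_cons]; split_ifs with hc
          · simp only [decide_eq_true_eq] at hc; omega
          · omega
        rw [e12, e21]
        push_cast
        simp only [Prod.mk.injEq, true_and]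
        ring
      · rw [if_neg h1]
        by_cases h2 : x2 < c ∧ c < x1
        · rw [if_pos h2, ih]
          have e12 : (c :: cs).countP (fun x => decide (x1 < x ∧ x < x2))
              = cs.countP (fun x => decide (x1 < x ∧ x < x2)) := by
            rw [List.countP_cons]; split_ifs with hc
            · simp only [decide_eq_true_eq] at hc; omega
            · omega
          have e21 : (c :: cs).countP (fun x => decide (x2 < x ∧ x < x1))
              = cs.countP (fun x => decide (x2 < x ∧ x < x1)) + 1 := by
            rw [List.countP_cons]; split_ifs with hc
            · rfl
            · simp only [decide_eq_true_eq, not_and, not_lt] at hc; omega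
          rw [e12, e21]
          push_cast
          simp only [Prod.mk.injEq, and_true]
          ring
        · rw [if_neg h2, ih]
          have e12 : (c :: cs).countP (fun x => decide (x1 < x ∧ x < x2))
              = cs.countP (fun x => decide (x1 < x ∧ x < x2)) := by
            rw [List.countP_cons]; split_ifs with hc
            · simp only [decide_eq_true_eq] at hc
              exact absurd hc h1
            · omega
          have e21 : (c :: cs).countP (fun x => decide (x2 < x ∧ x < x1))
              = cs.countP (fun x => decide (x2 < x ∧ x < x1)) := by
            rw [List.countP_cons]; split_ifs with hc
            · simp only [decide_eq_true_eq] at hc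
              exact absurd hc h2
            · omega
          rw [e12, e21]

-- strictly-between count from cumulative counts: #(a<x<b) + #(x≤a) = #(x<b) for a < b
theorem countSplitLe (a b : Int) (h : a < b) :
    ∀ l : List Int,
      (l.countP (fun x => decide (a < x ∧ x < b)) : Int)
        + l.countP (fun x => decide (x ≤ a))
      = l.countP (fun x => decide (x < b)) := by
  intro l
  induction l with
  | nil => simp
  | cons c cs ih =>
      simp only [List.countP_cons]
      push_cast
      split_ifs <;>
        simp only [decide_eq_true_eq, not_and, not_lt, not_le] at * <;>
        omega

theorem countP_between_zero (a b : Int) (h : b ≤ a) (l : List Int) :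
    l.countP (fun x => decide (a < x ∧ x < b)) = 0 := by
  rw [List.countP_eq_zero]
  intro x _
  simp; omega

-- per pair, per axis: A's strictly-between offsets equal B's cumulative-count formula
theorem axisEq (l : List Int) (a b m : Int) :
    pyAbs ((a + m * (l.countP (fun x => decide (b < x ∧ x < a)) : Int))
           - (b + m * (l.countP (fun x => decide (a < x ∧ x < b)) : Int)))
      = altAxis a (l.countP (fun x => decide (x < a)) : Int)
               (l.countP (fun x => decide (x ≤ a)) : Int)
               b (l.countP (fun x => decide (x < b)) : Int)
               (l.countP (fun x => decide (x ≤ b)) : Int) m := by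
  rcases lt_trichotomy a b with hab | hab | hab
  · rw [countP_between_zero b a (le_of_lt hab) l]
    have h1 := countSplitLe a b hab l
    simp only [altAxis, if_pos hab]
    have harg : a + m * ((0 : ℕ) : Int)
          - (b + m * (l.countP (fun x => decide (a < x ∧ x < b)) : Int))
        = -(b - a + m * ((l.countP (fun x => decide (x < b)) : Int)
            - (l.countP (fun x => decide (x ≤ a)) : Int))) := by
      rw [← h1]; push_cast; ring
    rw [harg]
    simp only [pyAbs]
    split_ifs <;> omega
  · subst hab
    rw [countP_between_zero a a (le_refl a) l]
    simp [altAxis, pyAbs]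
  · rw [countP_between_zero a b (le_of_lt hab) l]
    have h1 := countSplitLe b a hab l
    simp only [altAxis, if_neg (by omega : ¬ a < b), if_pos hab]
    have harg : a + m * (l.countP (fun x => decide (b < x ∧ x < a)) : Int)
          - (b + m * ((0 : ℕ) : Int))
        = a - b + m * ((l.countP (fun x => decide (x < a)) : Int)
            - (l.countP (fun x => decide (x ≤ b)) : Int)) := by
      rw [← h1]; push_cast; ring
    rw [harg]

-- ===== VERDICT (by name: the statement is the Claim_ definition above) =====
theorem get_distance_sum_spec : Claim_equal_get_distance_sum := by
  intro points cols rows multiplier _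
  show get_distance_sum points cols rows multiplier
      = get_distance_sum_alt points cols rows multiplier
  simp only [get_distance_sum, get_distance_sum_alt]
  have hA := foldEnumDrop
      (g := fun (p1 p2 : Int × Int) =>
        pyAbs (p1.1 + (cols.foldl
            (fun (o : Int × Int) x =>
              if p1.1 < x ∧ x < p2.1 then (o.1, o.2 + (multiplier - 1))
              else if p2.1 < x ∧ x < p1.1 then (o.1 + (multiplier - 1), o.2)
              else o) (0, 0)).1
          - (p2.1 + (cols.foldl
            (fun (o : Int × Int) x =>
              if p1.1 < x ∧ x < p2.1 then (o.1, o.2 + (multiplier - 1))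
              else if p2.1 < x ∧ x < p1.1 then (o.1 + (multiplier - 1), o.2)
              else o) (0, 0)).2))
        + pyAbs (p1.2 + (rows.foldl
            (fun (o : Int × Int) y =>
              if p1.2 < y ∧ y < p2.2 then (o.1, o.2 + (multiplier - 1))
              else if p2.2 < y ∧ y < p1.2 then (o.1 + (multiplier - 1), o.2)
              else o) (0, 0)).1
          - (p2.2 + (rows.foldl
            (fun (o : Int × Int) y =>
              if p1.2 < y ∧ y < p2.2 then (o.1, o.2 + (multiplier - 1))
              else if p2.2 < y ∧ y < p1.2 then (o.1 + (multiplier - 1), o.2)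
              else o) (0, 0)).2)))
      points points 0 0 rfl
  simp only [Nat.cast_zero, zero_add] at hA
  have hB := foldEnumDrop
      (g := fun (q q2 : Aug) =>
        altAxis q.x q.xlt q.xle q2.x q2.xlt q2.xle (multiplier - 1)
          + altAxis q.y q.ylt q.yle q2.y q2.ylt q2.yle (multiplier - 1))
      (points.map (fun p =>
        { x := p.1,
          xlt := (cols.countP (fun c => decide (c < p.1)) : Int),
          xle := (cols.countP (fun c => decide (c ≤ p.1)) : Int),
          y := p.2,
          ylt := (rows.countP (fun r => decide (r < p.2)) : Int),
          yle := (rows.countP (fun r => decide (r ≤ p.2)) : Int) : Aug }))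
      (points.map (fun p =>
        { x := p.1,
          xlt := (cols.countP (fun c => decide (c < p.1)) : Int),
          xle := (cols.countP (fun c => decide (c ≤ p.1)) : Int),
          y := p.2,
          ylt := (rows.countP (fun r => decide (r < p.2)) : Int),
          yle := (rows.countP (fun r => decide (r ≤ p.2)) : Int) : Aug }))
      0 0 rfl
  simp only [Nat.cast_zero, zero_add] at hB
  rw [hA]
  simp only [add_assoc]
  rw [hB, pairSum_map]
  apply pairSum_congr
  intro p1 p2
  rw [colsFold p1.1 p2.1 (multiplier - 1) cols 0 0,
      colsFold p1.2 p2.2 (multiplier - 1) rows 0 0]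
  simp only [zero_add]
  rw [axisEq cols p1.1 p2.1 (multiplier - 1), axisEq rows p1.2 p2.2 (multiplier - 1)]
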